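-- pv_equiv track=rewrite | github.com/adisi05/PanGenomeSimulator | neat/gen_reads.py | adjust_window_to_vars
-- ===== SOURCE A (Python) =====
-- def adjust_window_to_vars(base_pair_distance, buffer_added, end, final_position, is_last_time, overlap, vars_in_window):
--     # determine which structural variants will affect our sampling window positions
--     structural_vars = []
--     for n in vars_in_window:
--         # change: added abs() so that insertions are also buffered.
--         buffer_needed = max([max([abs(len(n[1]) - len(alt_allele)), 1]) for alt_allele in n[2]])
--         # -1 because going from VCF coords to array coords
--         structural_vars.append((n[0] - 1, buffer_needed))
--     # adjust end-position of window based on inserted structural mutations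
--     keep_going = True
--     while keep_going:
--         keep_going = False
--         for n in structural_vars:
--             # adding "overlap" here to prevent SVs from being introduced in overlap regions
--             # (which can cause problems if random mutations from the previous window land on top of them)
--             delta = (end - 1) - (n[0] + n[1]) - 2 - overlap
--             if delta < 0:
--                 buffer_added = -delta
--                 end += buffer_added
--                 keep_going = True
--                 break
--     next_start = end - overlap
--     next_end = min([next_start + base_pair_distance, final_position])
--     if next_end - next_start < base_pair_distance:
--         end = next_end
--         is_last_time = True
--     return buffer_added, end, is_last_time, next_end, next_start
-- ===== SOURCE B (Python) =====
-- def adjust_window_to_vars(base_pair_distance, buffer_added, end, final_position, is_last_time, overlap, vars_in_window):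
--     # Single left-to-right pass: each adjustment in the original rescan loop sets
--     # end exactly to pos + need + 2 + overlap, and those targets are strictly
--     # increasing records, so one pass over the variants suffices.
--     for pos, ref, alts in vars_in_window:
--         need = max(max(abs(len(ref) - len(alt)), 1) for alt in alts)
--         target = pos + need + 2 + overlap
--         if end < target:
--             buffer_added = target - end
--             end = target
--     next_start = end - overlap
--     next_end = min(next_start + base_pair_distance, final_position)
--     if next_end - next_start < base_pair_distance:
--         end = next_end
--         is_last_time = True
--     return buffer_added, end, is_last_time, next_end, next_start
-- ===== Notes on version B (the rewrite author's own statement) =====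
-- stated objective: alternative
-- what changed: A's restart-from-the-top rescan loop (after every adjustment it scans the structural-variant list again from the beginning) is replaced by a single left-to-right pass that bumps end at each variant whose target exceeds the running end, which is exact because each adjustment sets end precisely to that variant's target and the targets of successive adjustments are strictly increasing records.
-- outside the precondition, e.g. on adjust_window_to_vars(10, 0, 5, 100, False, 2, [(3, 'AC', [])]): A raises ValueError, B raises ValueError
import Mathlib
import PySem

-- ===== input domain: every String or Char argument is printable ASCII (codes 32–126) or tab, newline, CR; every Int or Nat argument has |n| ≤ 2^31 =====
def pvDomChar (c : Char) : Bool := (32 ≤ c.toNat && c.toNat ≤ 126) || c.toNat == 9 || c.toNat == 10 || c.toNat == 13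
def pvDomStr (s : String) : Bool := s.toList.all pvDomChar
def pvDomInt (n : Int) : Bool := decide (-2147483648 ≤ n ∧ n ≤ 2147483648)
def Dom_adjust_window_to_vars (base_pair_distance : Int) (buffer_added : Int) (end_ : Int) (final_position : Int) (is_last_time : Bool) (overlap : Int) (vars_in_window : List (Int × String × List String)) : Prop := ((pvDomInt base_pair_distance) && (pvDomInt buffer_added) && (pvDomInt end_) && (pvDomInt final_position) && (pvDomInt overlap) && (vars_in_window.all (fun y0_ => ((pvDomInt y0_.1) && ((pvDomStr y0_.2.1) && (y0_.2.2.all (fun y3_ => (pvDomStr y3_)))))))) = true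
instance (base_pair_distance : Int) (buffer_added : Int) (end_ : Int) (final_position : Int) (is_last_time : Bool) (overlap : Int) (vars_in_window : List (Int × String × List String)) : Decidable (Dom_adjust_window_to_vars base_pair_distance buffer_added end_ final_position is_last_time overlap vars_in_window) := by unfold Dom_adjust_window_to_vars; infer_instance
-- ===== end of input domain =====

-- B replaces A's restart-from-the-top rescan loop by a single left-to-right pass
-- (exact because the successive adjustment targets are strictly increasing records).
-- Note: A's while-loop raises nothing, but A raises ValueError (max of an empty list)
-- when some variant has an empty alt-allele list; Pre_ excludes exactly those inputs.

-- ===== PORT A =====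

-- helper lemma required by loopA's termination proof: strictly fewer elements
-- satisfy p than q when p implies q and some member satisfies q but not p.
theorem pvCountP_lt {α : Type} (l : List α) (p q : α → Bool)
    (hpq : ∀ x, p x = true → q x = true) (a : α) (ha : a ∈ l)
    (hqa : q a = true) (hpa : p a = false) : l.countP p < l.countP q := by
  induction l with
  | nil => cases ha
  | cons b t ih =>
    have hle : t.countP p ≤ t.countP q := List.countP_mono_left (fun x _ h => hpq x h)
    rcases List.mem_cons.mp ha with rfl | hmem
    · simp [hqa, hpa]; omega
    · have := ih hmem
      by_cases hb : p b = true
      · simp [hb, hpq b hb]; omega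
      · simp only [List.countP_cons]
        have : q b = true ∨ q b = false := by cases q b <;> simp
        rcases this with h | h <;> simp [hb, h] <;> omega

-- the Python `while keep_going:` rescan loop, transliterated: find the FIRST
-- structural variant whose delta is negative, bump end, start over.
def loopA (overlap : Int) (svs : List (Int × Int)) (ba e : Int) : Int × Int :=
  match hfind : svs.find? (fun n => decide ((e - 1) - (n.1 + n.2) - 2 - overlap < 0)) with
  | none => (ba, e)
  | some n =>
      loopA overlap svs (-((e - 1) - (n.1 + n.2) - 2 - overlap))
        (e + -((e - 1) - (n.1 + n.2) - 2 - overlap))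
termination_by svs.countP (fun n => decide ((e - 1) - (n.1 + n.2) - 2 - overlap < 0))
decreasing_by
  have hmem := List.mem_of_find?_eq_some hfind
  have hpn := List.find?_some hfind
  simp only [decide_eq_true_eq] at hpn
  refine pvCountP_lt _ _ _ ?_ n hmem ?_ ?_
  · intro x hx
    simp only [decide_eq_true_eq] at hx ⊢
    omega
  · simp only [decide_eq_true_eq]; omega
  · simp only [decide_eq_false_iff_not]; omega

def adjust_window_to_vars (base_pair_distance : Int) (buffer_added : Int) (end_ : Int) (final_position : Int) (is_last_time : Bool) (overlap : Int) (vars_in_window : List (Int × String × List String)) : Int × Int × Bool × Int × Int :=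
  -- structural_vars = [(n[0] - 1, buffer_needed) for n in vars_in_window]
  let structural_vars := vars_in_window.map (fun n =>
    (n.1 - 1,
     (PySem.List.max? (n.2.2.map (fun alt_allele =>
        max (|PySem.Str.len n.2.1 - PySem.Str.len alt_allele|) 1)) (fun x => x)).getD 0))
  -- (the .getD 0 branch is only reached where Python raises ValueError; excluded by Pre_)
  let r := loopA overlap structural_vars buffer_added end_
  let next_start := r.2 - overlap
  let next_end := min (next_start + base_pair_distance) final_position
  if next_end - next_start < base_pair_distance then
    (r.1, next_end, true, next_end, next_start)
  else
    (r.1, r.2, is_last_time, next_end, next_start)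

-- ===== PORT B =====
def adjust_window_to_vars_alt (base_pair_distance : Int) (buffer_added : Int) (end_ : Int) (final_position : Int) (is_last_time : Bool) (overlap : Int) (vars_in_window : List (Int × String × List String)) : Int × Int × Bool × Int × Int :=
  -- single pass: (buffer_added, end) threaded through a fold over the variants
  let s := vars_in_window.foldl (fun (s : Int × Int) v =>
    let need := (PySem.List.max? (v.2.2.map (fun alt =>
        max (|PySem.Str.len v.2.1 - PySem.Str.len alt|) 1)) (fun x => x)).getD 0
    let target := v.1 + need + 2 + overlap
    if s.2 < target then (target - s.2, target) else s) (buffer_added, end_)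
  let next_start := s.2 - overlap
  let next_end := min (next_start + base_pair_distance) final_position
  if next_end - next_start < base_pair_distance then
    (s.1, next_end, true, next_end, next_start)
  else
    (s.1, s.2, is_last_time, next_end, next_start)

-- ===== PRECONDITION & SPEC =====
-- Pre_ excludes exactly the inputs where Python A raises ValueError:
-- a variant whose list of alt alleles is empty (max([]) in buffer_needed).
def Pre_adjust_window_to_vars (base_pair_distance : Int) (buffer_added : Int) (end_ : Int) (final_position : Int) (is_last_time : Bool) (overlap : Int) (vars_in_window : List (Int × String × List String)) : Prop :=
  ∀ v ∈ vars_in_window, v.2.2 ≠ []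
instance (base_pair_distance : Int) (buffer_added : Int) (end_ : Int) (final_position : Int) (is_last_time : Bool) (overlap : Int) (vars_in_window : List (Int × String × List String)) : Decidable (Pre_adjust_window_to_vars base_pair_distance buffer_added end_ final_position is_last_time overlap vars_in_window) := by unfold Pre_adjust_window_to_vars; infer_instance

def pvWitness_adjust_window_to_vars : Int × Int × Int × Int × Bool × Int × (List (Int × String × List String)) :=
  (10, 0, 5, 100, false, 2, [(3, "AC", ["A", "ACGT"]), (8, "G", ["GT"])])

def Spec_adjust_window_to_vars (base_pair_distance : Int) (buffer_added : Int) (end_ : Int) (final_position : Int) (is_last_time : Bool) (overlap : Int) (vars_in_window : List (Int × String × List String)) (out : Int × Int × Bool × Int × Int) : Prop := out = adjust_window_to_vars_alt base_pair_distance buffer_added end_ final_position is_last_time overlap vars_in_window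
instance (base_pair_distance : Int) (buffer_added : Int) (end_ : Int) (final_position : Int) (is_last_time : Bool) (overlap : Int) (vars_in_window : List (Int × String × List String)) (out : Int × Int × Bool × Int × Int) : Decidable (Spec_adjust_window_to_vars base_pair_distance buffer_added end_ final_position is_last_time overlap vars_in_window out) := by unfold Spec_adjust_window_to_vars; infer_instance

-- ===== CLAIM (what is proved, stated in full; the proofs are below) =====
def Claim_equal_adjust_window_to_vars : Prop := ∀ (base_pair_distance : Int) (buffer_added : Int) (end_ : Int) (final_position : Int) (is_last_time : Bool) (overlap : Int) (vars_in_window : List (Int × String × List String)), Dom_adjust_window_to_vars base_pair_distance buffer_added end_ final_position is_last_time overlap vars_in_window → Pre_adjust_window_to_vars base_pair_distance buffer_added end_ final_position is_last_time overlap vars_in_window → Spec_adjust_window_to_vars base_pair_distance buffer_added end_ final_position is_last_time overlap vars_in_window (adjust_window_to_vars base_pair_distance buffer_added end_ final_position is_last_time overlap vars_in_window)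

-- ===== LEMMAS AND PROOFS =====

-- B's one-pass step over a precomputed structural variant (pos-1, need)
def stepB (overlap : Int) (s : Int × Int) (n : Int × Int) : Int × Int :=
  if s.2 < n.1 + n.2 + 3 + overlap then (n.1 + n.2 + 3 + overlap - s.2, n.1 + n.2 + 3 + overlap) else s

-- once the head variant is already satisfied it stays satisfied (end only grows),
-- so A's rescan over (h :: rest) behaves as a rescan over rest.
theorem loopA_cons_of_le (overlap : Int) (h : Int × Int) (rest : List (Int × Int)) :
    ∀ k ba e, ((h :: rest).countP (fun n => decide ((e - 1) - (n.1 + n.2) - 2 - overlap < 0))) ≤ k →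
      h.1 + h.2 + 3 + overlap ≤ e →
      loopA overlap (h :: rest) ba e = loopA overlap rest ba e := by
  intro k
  induction k with
  | zero =>
    intro ba e hk hle
    rw [loopA, loopA]
    rw [List.find?_cons_of_neg (by simp only [decide_eq_true_eq]; omega)]
    cases hf : rest.find? (fun n => decide ((e - 1) - (n.1 + n.2) - 2 - overlap < 0)) with
    | none => rfl
    | some n =>
      exfalso
      have hmem := List.mem_of_find?_eq_some hf
      have hpn := List.find?_some hf
      have : 0 < (h :: rest).countP (fun n => decide ((e - 1) - (n.1 + n.2) - 2 - overlap < 0)) := by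
        apply List.countP_pos_iff.mpr
        exact ⟨n, List.mem_cons_of_mem _ hmem, hpn⟩
      omega
  | succ k ih =>
    intro ba e hk hle
    rw [loopA, loopA]
    rw [List.find?_cons_of_neg (by simp only [decide_eq_true_eq]; omega)]
    cases hf : rest.find? (fun n => decide ((e - 1) - (n.1 + n.2) - 2 - overlap < 0)) with
    | none => rfl
    | some n =>
      have hmem := List.mem_of_find?_eq_some hf
      have hpn := List.find?_some hf
      simp only [decide_eq_true_eq] at hpn
      -- new end is n.1 + n.2 + 3 + overlap
      have he' : e + -((e - 1) - (n.1 + n.2) - 2 - overlap) = n.1 + n.2 + 3 + overlap := by ring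
      apply ih
      · -- measure decreases: countP at the new end < countP at e ≤ k+1
        have hlt : (h :: rest).countP (fun m => decide ((e + -((e - 1) - (n.1 + n.2) - 2 - overlap) - 1) - (m.1 + m.2) - 2 - overlap < 0))
            < (h :: rest).countP (fun m => decide ((e - 1) - (m.1 + m.2) - 2 - overlap < 0)) := by
          refine pvCountP_lt _ _ _ ?_ n (List.mem_cons_of_mem _ hmem) ?_ ?_
          · intro x hx; simp only [decide_eq_true_eq] at hx ⊢; omega
          · simp only [decide_eq_true_eq]; omega
          · simp only [decide_eq_false_iff_not]; omega
        omega
      · omega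

-- A's rescan loop equals B's single left-to-right fold.
theorem loopA_eq_foldl (overlap : Int) (svs : List (Int × Int)) :
    ∀ ba e, loopA overlap svs ba e = svs.foldl (stepB overlap) (ba, e) := by
  induction svs with
  | nil => intro ba e; rw [loopA]; rfl
  | cons h rest ih =>
    intro ba e
    by_cases hc : e < h.1 + h.2 + 3 + overlap
    · -- head violates: A bumps to the head's target, then the head is satisfied
      rw [loopA]
      rw [List.find?_cons_of_pos (by simp only [decide_eq_true_eq]; omega)]
      split
      next heq => cases heq
      next n heq =>
      injection heq with heq'
      subst heq'
      have he' : e + -((e - 1) - (h.1 + h.2) - 2 - overlap) = h.1 + h.2 + 3 + overlap := by ring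
      rw [loopA_cons_of_le overlap h rest _ _ _ (le_refl _) (by omega)]
      rw [ih]
      simp only [List.foldl_cons, stepB, if_pos hc]
      congr 1
      simp only [Prod.mk.injEq]
      constructor <;> omega
    · -- head satisfied: skip it on both sides
      rw [loopA_cons_of_le overlap h rest _ ba e (le_refl _) (by omega)]
      rw [ih]
      simp only [List.foldl_cons, stepB, if_neg hc]

theorem adjust_window_to_vars_eq (base_pair_distance : Int) (buffer_added : Int) (end_ : Int) (final_position : Int) (is_last_time : Bool) (overlap : Int) (vars_in_window : List (Int × String × List String)) :
    adjust_window_to_vars base_pair_distance buffer_added end_ final_position is_last_time overlap vars_in_window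
      = adjust_window_to_vars_alt base_pair_distance buffer_added end_ final_position is_last_time overlap vars_in_window := by
  unfold adjust_window_to_vars adjust_window_to_vars_alt
  have hfun : (fun (s : Int × Int) (n : Int × String × List String) =>
      stepB overlap s (n.1 - 1,
        (PySem.List.max? (n.2.2.map (fun alt_allele =>
          max (|PySem.Str.len n.2.1 - PySem.Str.len alt_allele|) 1)) (fun x => x)).getD 0))
      = (fun (s : Int × Int) (v : Int × String × List String) =>
        let need := (PySem.List.max? (v.2.2.map (fun alt =>
          max (|PySem.Str.len v.2.1 - PySem.Str.len alt|) 1)) (fun x => x)).getD 0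
        let target := v.1 + need + 2 + overlap
        if s.2 < target then (target - s.2, target) else s) := by
    funext s v
    simp only [stepB]
    have harith : v.1 - 1 + ((PySem.List.max? (v.2.2.map (fun alt =>
        max (|PySem.Str.len v.2.1 - PySem.Str.len alt|) 1)) (fun x => x)).getD 0) + 3 + overlap
        = v.1 + ((PySem.List.max? (v.2.2.map (fun alt =>
        max (|PySem.Str.len v.2.1 - PySem.Str.len alt|) 1)) (fun x => x)).getD 0) + 2 + overlap := by ring
    rw [harith]
  simp only [loopA_eq_foldl, List.foldl_map, hfun]

-- ===== VERDICT (by name: the statement is the Claim_ definition above) =====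
theorem adjust_window_to_vars_spec : Claim_equal_adjust_window_to_vars := by
  intro bpd ba e fp ilt ov vw _ _
  unfold Spec_adjust_window_to_vars
  exact adjust_window_to_vars_eq bpd ba e fp ilt ov vw
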